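-- pv_equiv track=rewrite | github.com/tanupriya9102/Aditya-Verma-Playlists | Recursion/Delete Middle Element of a Stack.py | solve
-- ===== SOURCE A (Python) =====
-- def solve(s,k):
--     if(k==1):
--         s.pop()
--         return s
--     temp=s.pop()
--     solve(s,k-1)
--     s.append(temp)
--     return s
-- ===== SOURCE B (Python) =====
-- def solve(s, k):
--     temp = []
--     while k != 1:
--         temp.append(s.pop())
--         k -= 1
--     s.pop()
--     while temp:
--         s.append(temp.pop())
--     return s
-- ===== Notes on version B (the rewrite author's own statement) =====
-- stated objective: alternative
-- what changed: Replaces A's recursive unwind/rewind (one stack frame per popped element) with an explicit iterative version using a temp list: pop k-1 elements into temp, pop the target, push temp back in LIFO order.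
import Mathlib
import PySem

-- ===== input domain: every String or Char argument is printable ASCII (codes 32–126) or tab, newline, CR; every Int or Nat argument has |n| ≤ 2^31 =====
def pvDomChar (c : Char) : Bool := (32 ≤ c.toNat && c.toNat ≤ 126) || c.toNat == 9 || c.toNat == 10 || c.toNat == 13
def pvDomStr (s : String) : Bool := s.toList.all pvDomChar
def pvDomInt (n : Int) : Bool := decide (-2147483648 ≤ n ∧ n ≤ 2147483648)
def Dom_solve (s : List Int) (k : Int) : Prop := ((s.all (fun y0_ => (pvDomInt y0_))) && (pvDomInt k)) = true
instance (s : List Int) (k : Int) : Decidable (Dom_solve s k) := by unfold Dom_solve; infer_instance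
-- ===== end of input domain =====

-- B replaces A's recursive unwind/rewind with an explicit iterative temp-list version
-- (objective: alternative decomposition, same cost). Both Pythons mutate s in place
-- identically; the equivalence proved here is about the RETURN value.

-- ===== PORT A =====
-- recursion: if k==1 pop; else pop to temp, recurse with k-1, push temp back
def solve (s : List Int) (k : Int) : List Int :=
  if k = 1 then
    match PySem.List.pop? s with
    | none => []                         -- s.pop() on empty raises IndexError: outside Pre_solve
    | some (_, rest) => rest
  else
    match h : PySem.List.pop? s with
    | none => []                         -- IndexError: outside Pre_solve
    | some (temp, rest) => solve rest (k - 1) ++ [temp]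
termination_by s.length
decreasing_by
  have := PySem.List.length_of_pop?_eq_some s h
  simp at this; omega

-- ===== PORT B =====
-- while k != 1: temp.append(s.pop()); k -= 1
def solveAltUnwind (s temp : List Int) (k : Int) : List Int × List Int :=
  if k = 1 then (s, temp)
  else
    match h : PySem.List.pop? s with
    | none => (s, temp)                  -- IndexError: outside Pre_solve
    | some (x, rest) => solveAltUnwind rest (temp ++ [x]) (k - 1)
termination_by s.length
decreasing_by
  have := PySem.List.length_of_pop?_eq_some s h
  simp at this; omega

-- while temp: s.append(temp.pop())
def solveAltRestore (s temp : List Int) : List Int :=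
  match h : PySem.List.pop? temp with
  | none => s
  | some (x, rest) => solveAltRestore (s ++ [x]) rest
termination_by temp.length
decreasing_by
  have := PySem.List.length_of_pop?_eq_some temp h
  simp at this; omega

def solve_alt (s : List Int) (k : Int) : List Int :=
  let p := solveAltUnwind s [] k
  let s2 := match PySem.List.pop? p.1 with
            | none => []                 -- IndexError: outside Pre_solve
            | some (_, rest) => rest
  solveAltRestore s2 p.2

-- ===== PRECONDITION & SPEC =====
-- Pre_ excludes exactly the inputs where A raises IndexError (pop from an emptied list):
-- k < 1 drains the whole stack, and k > len(s) runs out of elements before reaching k == 1.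
def Pre_solve (s : List Int) (k : Int) : Prop := 1 ≤ k ∧ k ≤ (s.length : Int)
instance (s : List Int) (k : Int) : Decidable (Pre_solve s k) := by unfold Pre_solve; infer_instance
def pvWitness_solve : List Int × Int := ([1, 2, 3], 2)

def Spec_solve (s : List Int) (k : Int) (out : List Int) : Prop := out = solve_alt s k
instance (s : List Int) (k : Int) (out : List Int) : Decidable (Spec_solve s k out) := by unfold Spec_solve; infer_instance

-- ===== CLAIM (what is proved, stated in full; the proofs are below) =====
def Claim_equal_solve : Prop := ∀ (s : List Int) (k : Int), Dom_solve s k → Pre_solve s k → Spec_solve s k (solve s k)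

-- ===== LEMMAS AND PROOFS =====

theorem solve_closed (n : Nat) : ∀ (s : List Int), n < s.length →
    solve s ((n : Int) + 1) = s.take (s.length - n - 1) ++ s.drop (s.length - n) := by
  induction n with
  | zero =>
    intro s hs
    rcases s.eq_nil_or_concat with rfl | ⟨ys, y, rfl⟩
    · simp at hs
    · simp only [List.concat_eq_append] at hs ⊢
      rw [solve]
      simp [PySem.List.pop?_last]
  | succ n ih =>
    intro s hs
    rcases s.eq_nil_or_concat with rfl | ⟨ys, y, rfl⟩
    · simp at hs
    · simp only [List.concat_eq_append] at hs ⊢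
      rw [solve, if_neg (by push_cast; omega), PySem.List.pop?_last]
      simp only [List.length_append, List.length_cons, List.length_nil] at hs ⊢
      have hn : n < ys.length := by omega
      have hk : (((n + 1 : Nat) : Int)) + 1 - 1 = (n : Int) + 1 := by push_cast; ring
      rw [hk, ih ys hn]
      have h1 : ys.length + (0 + 1) - (n + 1) - 1 = ys.length - n - 1 := by omega
      have h2 : ys.length + (0 + 1) - (n + 1) = ys.length - n := by omega
      rw [h1, h2,
        List.take_append_of_le_length (by omega),
        List.drop_append_of_le_length (by omega), List.append_assoc]

theorem unwind_closed (n : Nat) : ∀ (s temp : List Int), n ≤ s.length →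
    solveAltUnwind s temp ((n : Int) + 1) =
      (s.take (s.length - n), temp ++ (s.drop (s.length - n)).reverse) := by
  induction n with
  | zero =>
    intro s temp _
    rw [solveAltUnwind]
    simp
  | succ n ih =>
    intro s temp hs
    rcases s.eq_nil_or_concat with rfl | ⟨ys, y, rfl⟩
    · simp at hs
    · simp only [List.concat_eq_append] at hs ⊢
      rw [solveAltUnwind, if_neg (by push_cast; omega), PySem.List.pop?_last]
      simp only [List.length_append, List.length_cons, List.length_nil] at hs ⊢
      have hn : n ≤ ys.length := by omega
      have hk : (((n + 1 : Nat) : Int)) + 1 - 1 = (n : Int) + 1 := by push_cast; ring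
      rw [hk, ih ys (temp ++ [y]) hn]
      have h2 : ys.length + (0 + 1) - (n + 1) = ys.length - n := by omega
      rw [h2,
        List.take_append_of_le_length (by omega),
        List.drop_append_of_le_length (by omega)]
      simp [List.reverse_append, List.append_assoc]

theorem restore_closed (temp : List Int) : ∀ (s : List Int),
    solveAltRestore s temp = s ++ temp.reverse := by
  induction temp using List.reverseRecOn with
  | nil => intro s; rw [solveAltRestore]; simp [PySem.List.pop?, PySem.List.pyIdx?]
  | append_singleton ys y ih =>
    intro s
    rw [solveAltRestore, PySem.List.pop?_last]
    simp only
    rw [ih]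
    simp

theorem dropLast_take (s : List Int) (m : Nat) (hm : m ≤ s.length) :
    (s.take m).dropLast = s.take (m - 1) := by
  rw [List.dropLast_eq_take, List.take_take]
  congr 1
  simp
  omega

-- ===== VERDICT (by name: the statement is the Claim_ definition above) =====
theorem solve_spec : Claim_equal_solve := by
  intro s k _ hpre
  obtain ⟨h1, h2⟩ := hpre
  obtain ⟨n, rfl⟩ : ∃ n : Nat, k = (n : Int) + 1 := ⟨(k - 1).toNat, by omega⟩
  have hn : n < s.length := by omega
  unfold Spec_solve solve_alt
  rw [unwind_closed n s [] (by omega)]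
  simp only
  have hlen : 1 ≤ s.length - n := by omega
  rcases (s.take (s.length - n)).eq_nil_or_concat with hnil | ⟨zs, z, hzs⟩
  · have : (s.take (s.length - n)).length = 0 := by rw [hnil]; simp
    simp at this; omega
  · simp only [List.concat_eq_append] at hzs
    rw [hzs, PySem.List.pop?_last]
    simp only
    rw [restore_closed]
    simp only [List.nil_append, List.reverse_reverse]
    rw [solve_closed n s hn]
    have : zs = (s.take (s.length - n)).dropLast := by rw [hzs]; simp
    rw [this, dropLast_take s _ (by omega)]
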